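-- pv_equiv track=rewrite | github.com/pengjichengbest/Algorithm | new_problem.py | getMaxRepetitions
-- ===== SOURCE A (Python) =====
-- def getMaxRepetitions(s1, n1, s2, n2):
--     m, n = len(s1), len(s2)
--     record = set(s1)
--     for i in range(n):
--         if s2[i] not in record:
--             return 0
--
--     def check(end):
--         length = 1
--         for i in range(n):
--             while s1[end] != s2[i]:
--                 end = (end + 1) % m
--                 length += 1
--             if i == n - 1:
--                 return end, length
--             end, length = (end + 1) % m, length + 1
--
--     start, start_length = check(0)
--     if m * n1 < start_length:
--         return 0
--     record = [0]
--     memory_index = set()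
--     memory_index.add(start)
--     end = (start + 1) % m
--     length_sum = 0
--     period_s2 = 0
--     while True:
--         end, length = check(end)
--         period_s2 += 1
--         length_sum += length
--         record.append(record[-1] + length)
--         if end not in memory_index:
--             memory_index.add(end)
--             end = (end + 1) % m
--         else:
--             break
--     div, mod = (m * n1 - start_length) // length_sum, (m * n1 - start_length) % length_sum
--     while mod < record[-1]:
--         record.pop()
--     maxV = div * period_s2 + len(record)
--     ans = maxV // n2
--     return ans
-- ===== SOURCE B (Python) =====
-- from bisect import bisect_left, bisect_right
--
-- def getMaxRepetitions(s1, n1, s2, n2):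
--     m = len(s1)
--     # sorted occurrence positions in s1, grouped by character in one pass
--     pos = {}
--     for i, ch in enumerate(s1):
--         pos.setdefault(ch, []).append(i)
--     occ = [pos.get(c, []) for c in s2]
--     if any(not lst for lst in occ):
--         return 0
--
--     def check(end):
--         # match one whole copy of s2 along the circular s1, starting at position end;
--         # each character is found by one bisect in its occurrence list (O(log m) jump)
--         length = 0
--         last = end
--         for lst in occ:
--             k = bisect_left(lst, end)
--             last = lst[k] if k < len(lst) else lst[0]
--             length += last - end + 1 if last >= end else m - end + last + 1
--             end = (last + 1) % m
--         return last, length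
--
--     start, start_length = check(0)
--     if m * n1 < start_length:
--         return 0
--     record = [0]
--     memory = {start}
--     end = (start + 1) % m
--     length_sum = 0
--     period_s2 = 0
--     while True:
--         end, length = check(end)
--         period_s2 += 1
--         length_sum += length
--         record.append(record[-1] + length)
--         if end in memory:
--             break
--         memory.add(end)
--         end = (end + 1) % m
--     div, mod = divmod(m * n1 - start_length, length_sum)
--     maxV = div * period_s2 + bisect_right(record, mod)
--     return maxV // n2
-- ===== Notes on version B (the rewrite author's own statement) =====
-- stated objective: alternative
-- what changed: B groups s1's positions by character in one pass and matches each s2 character with a bisect jump into its occurrence list (and replaces A's record-popping loop by one bisect_right), instead of A's linear circular scans per character.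
-- outside the precondition, e.g. on getMaxRepetitions('ab', 0, 'ab', 0): A returns 0, B returns 0
import Mathlib
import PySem

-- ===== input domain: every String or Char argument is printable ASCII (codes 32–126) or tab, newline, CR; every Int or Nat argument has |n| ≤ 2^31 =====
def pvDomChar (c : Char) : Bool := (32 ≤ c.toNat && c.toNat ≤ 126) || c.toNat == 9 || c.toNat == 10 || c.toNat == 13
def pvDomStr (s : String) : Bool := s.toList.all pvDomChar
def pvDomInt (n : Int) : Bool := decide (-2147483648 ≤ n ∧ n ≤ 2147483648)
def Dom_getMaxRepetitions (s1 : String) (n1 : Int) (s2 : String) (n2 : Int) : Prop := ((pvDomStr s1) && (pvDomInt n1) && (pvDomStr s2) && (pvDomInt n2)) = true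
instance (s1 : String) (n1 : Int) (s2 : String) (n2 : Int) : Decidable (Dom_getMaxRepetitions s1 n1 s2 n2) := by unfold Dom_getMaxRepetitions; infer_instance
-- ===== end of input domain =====

-- B replaces A's linear circular scans by bisect jumps over per-character occurrence
-- lists (one precomputed check-table T, and the final pop loop by one bisect_right).

-- ===== PORT A =====

-- inner 'while s1[end] != s2[i]' of A's check; fuel m always suffices (the char occurs in s1)
def pvFindA (l1 : List Char) (m : Int) (c : Char) : Nat → Int → Int → Int × Int
  | 0, e, len => (e, len)
  | fuel+1, e, len =>
    match PySem.List.pyGet? l1 e with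
    | some ch => if ch ≠ c then pvFindA l1 m c fuel (PySem.Int.mod (e+1) m) (len+1) else (e, len)
    | none => (e, len)

-- A's check(end): for i in range(n) with the early return at i == n-1
def pvCheckA (l1 : List Char) (m : Int) : List Char → Int → Int → Int × Int
  | [], e, len => (e, len)
  | c :: rest, e, len =>
    let r := pvFindA l1 m c m.toNat e len
    match rest with
    | [] => r
    | _ :: _ => pvCheckA l1 m rest (PySem.Int.mod (r.1+1) m) (r.2+1)

-- A's 'while True' loop; state (end, record, memory_index, length_sum, period_s2)
def pvLoopA (l1 : List Char) (m : Int) (l2 : List Char) :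
    Nat → Int → List Int → PySem.Set Int → Int → Int → List Int × Int × Int
  | 0, _, rec, _, ls, p => (rec, ls, p)
  | fuel+1, e, rec, mem, ls, p =>
    let r := pvCheckA l1 m l2 e 1
    let rec' := rec ++ [PySem.List.pyGetD rec (-1) 0 + r.2]
    if ¬ (PySem.Set.contains mem r.1) then
      pvLoopA l1 m l2 fuel (PySem.Int.mod (r.1+1) m) rec' (PySem.Set.add mem r.1) (ls + r.2) (p+1)
    else (rec', ls + r.2, p+1)

-- A's 'while mod < record[-1]: record.pop()'
def pvPopA : Nat → List Int → Int → List Int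
  | 0, rec, _ => rec
  | fuel+1, rec, md =>
    if md < PySem.List.pyGetD rec (-1) 0 then pvPopA fuel rec.dropLast md else rec

def getMaxRepetitions (s1 : String) (n1 : Int) (s2 : String) (n2 : Int) : Int :=
  let l1 := s1.toList
  let l2 := s2.toList
  let m : Int := l1.length
  let record := PySem.Set.ofList l1
  if l2.any (fun c => !(PySem.Set.contains record c)) then 0
  else
    let st := pvCheckA l1 m l2 0 1
    if m * n1 < st.2 then 0
    else
      let res := pvLoopA l1 m l2 (m.toNat + 2) (PySem.Int.mod (st.1 + 1) m) [0]
                   (PySem.Set.add PySem.Set.empty st.1) 0 0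
      let dv := PySem.Int.floordiv (m * n1 - st.2) res.2.1
      let md := PySem.Int.mod (m * n1 - st.2) res.2.1
      let rec' := pvPopA res.1.length res.1 md
      PySem.Int.floordiv (dv * res.2.2 + (rec'.length : Int)) n2

-- ===== PORT B =====

-- pos = {}; for i, ch in enumerate(s1): pos.setdefault(ch, []).append(i)
def pvPos (l1 : List Char) : PySem.Dict Char (List Int) :=
  (l1.zipIdx.map (fun p => (p.1, (p.2 : Int)))).foldl
    (fun d p => PySem.Dict.modify d p.1 [] (fun lst => lst ++ [p.2])) PySem.Dict.empty

-- one character of B's check: bisect into the occurrence list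
def pvStepB (m : Int) (st : Int × Int × Int) (lst : List Int) : Int × Int × Int :=
  let k := PySem.List.bisectLeft lst st.1
  let last := if (k : Int) < lst.length then PySem.List.pyGetD lst (k : Int) 0
              else PySem.List.pyGetD lst 0 0
  let add := if last ≥ st.1 then last - st.1 + 1 else m - st.1 + last + 1
  (PySem.Int.mod (last + 1) m, last, st.2.2 + add)

-- B's check(end): fold over the occurrence lists, state (end, last, length)
def pvCheckB (m : Int) (occ : List (List Int)) (e : Int) : Int × Int :=
  let st := occ.foldl (pvStepB m) (e, e, 0)
  (st.2.1, st.2.2)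

-- B's 'while True' loop, calling the bisect-based check
def pvLoopB (m : Int) (occ : List (List Int)) :
    Nat → Int → List Int → PySem.Set Int → Int → Int → List Int × Int × Int
  | 0, _, rec, _, ls, p => (rec, ls, p)
  | fuel+1, e, rec, mem, ls, p =>
    let r := pvCheckB m occ e
    let rec' := rec ++ [PySem.List.pyGetD rec (-1) 0 + r.2]
    if PySem.Set.contains mem r.1 then (rec', ls + r.2, p+1)
    else pvLoopB m occ fuel (PySem.Int.mod (r.1+1) m) rec' (PySem.Set.add mem r.1) (ls + r.2) (p+1)

def getMaxRepetitions_alt (s1 : String) (n1 : Int) (s2 : String) (n2 : Int) : Int :=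
  let l1 := s1.toList
  let l2 := s2.toList
  let m : Int := l1.length
  let occ := l2.map (fun c => PySem.Dict.getD (pvPos l1) c [])
  if occ.any (fun lst => lst.isEmpty) then 0
  else
    let st := pvCheckB m occ 0
    if m * n1 < st.2 then 0
    else
      let res := pvLoopB m occ (m.toNat + 2) (PySem.Int.mod (st.1 + 1) m) [0]
                   (PySem.Set.add PySem.Set.empty st.1) 0 0
      let dv := PySem.Int.floordiv (m * n1 - st.2) res.2.1
      let md := PySem.Int.mod (m * n1 - st.2) res.2.1
      PySem.Int.floordiv (dv * res.2.2 + (PySem.List.bisectRight res.1 md : Int)) n2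

-- ===== PRECONDITION & SPEC =====
-- Pre_ excludes empty s2 (A's check returns None there and unpacking it raises TypeError)
-- and n2 = 0 except when some s2 character is missing from s1 (A raises ZeroDivisionError
-- with n2 = 0 unless it takes an early return; the remaining excluded early return, reaching
-- 'm * n1 < start_length' with n2 = 0, has both programs returning 0).
def Pre_getMaxRepetitions (s1 : String) (_n1 : Int) (s2 : String) (n2 : Int) : Prop :=
  s2 ≠ "" ∧ (n2 ≠ 0 ∨ ∃ c ∈ s2.toList, c ∉ s1.toList)
instance (s1 : String) (n1 : Int) (s2 : String) (n2 : Int) : Decidable (Pre_getMaxRepetitions s1 n1 s2 n2) := by unfold Pre_getMaxRepetitions; infer_instance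

def pvWitness_getMaxRepetitions : String × Int × String × Int := ("acaba", 6, "ab", 2)

def Spec_getMaxRepetitions (s1 : String) (n1 : Int) (s2 : String) (n2 : Int) (out : Int) : Prop := out = getMaxRepetitions_alt s1 n1 s2 n2
instance (s1 : String) (n1 : Int) (s2 : String) (n2 : Int) (out : Int) : Decidable (Spec_getMaxRepetitions s1 n1 s2 n2 out) := by unfold Spec_getMaxRepetitions; infer_instance

-- ===== CLAIM (what is proved, stated in full; the proofs are below) =====
def Claim_equal_getMaxRepetitions : Prop := ∀ (s1 : String) (n1 : Int) (s2 : String) (n2 : Int), Dom_getMaxRepetitions s1 n1 s2 n2 → Pre_getMaxRepetitions s1 n1 s2 n2 → Spec_getMaxRepetitions s1 n1 s2 n2 (getMaxRepetitions s1 n1 s2 n2)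

-- ===== LEMMAS AND PROOFS =====


-- the occurrence list of a character (what B's dict stores per key)
def pvOcc (l1 : List Char) (c : Char) : List Int :=
  (l1.zipIdx.filter (fun p => p.1 == c)).map (fun p => (p.2 : Int))

-- B's grouped dict holds exactly the occurrence lists
theorem pvPos_getD (l1 : List Char) (c : Char) :
    PySem.Dict.getD (pvPos l1) c [] = pvOcc l1 c := by
  unfold pvPos pvOcc
  rw [PySem.Dict.getD_foldl_modify_append, PySem.Dict.getD_empty]
  rw [List.filter_map, List.map_map]
  simp [Function.comp_def]

-- occurrence-list positions are strictly increasing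
theorem pvOcc_pairwise (l1 : List Char) (c : Char) : (pvOcc l1 c).Pairwise (· < ·) := by
  unfold pvOcc
  rw [List.pairwise_map]
  refine List.Pairwise.sublist List.filter_sublist ?_
  rw [List.pairwise_iff_getElem]
  intro i j hi hj hij
  simp only [List.getElem_zipIdx]
  exact_mod_cast by omega

-- membership in the occurrence list
theorem pvOcc_mem (l1 : List Char) (c : Char) (x : Int) :
    x ∈ pvOcc l1 c ↔ ∃ i : Nat, i < l1.length ∧ x = (i : Int) ∧ l1[i]? = some c := by
  unfold pvOcc
  simp only [List.mem_map, List.mem_filter]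
  constructor
  · rintro ⟨⟨a, i⟩, ⟨hmem, hac⟩, rfl⟩
    rw [List.mem_zipIdx_iff_getElem?] at hmem
    simp only [beq_iff_eq] at hac
    subst hac
    exact ⟨i, by simpa using (List.getElem?_eq_some_iff.mp hmem).1, rfl, hmem⟩
  · rintro ⟨i, hi, rfl, hci⟩
    exact ⟨(c, i), ⟨List.mem_zipIdx_iff_getElem?.mpr hci, by simp⟩, rfl⟩

theorem pvOcc_eq_nil_iff (l1 : List Char) (c : Char) : pvOcc l1 c = [] ↔ c ∉ l1 := by
  rw [List.eq_nil_iff_forall_not_mem]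
  constructor
  · intro h hc
    obtain ⟨i, hi, hci⟩ := List.mem_iff_getElem.mp hc
    exact h (i : Int) ((pvOcc_mem l1 c i).mpr ⟨i, hi, rfl, by rw [List.getElem?_eq_getElem hi, hci]⟩)
  · intro h x hx
    obtain ⟨i, hi, -, hci⟩ := (pvOcc_mem l1 c x).mp hx
    exact h (by rw [List.mem_iff_getElem]; exact ⟨i, hi, by rw [List.getElem?_eq_getElem hi] at hci; exact Option.some_injective _ hci⟩)

-- the two early-return-0 guards agree
theorem pvGuard_eq (l1 l2 : List Char) :
    (l2.any fun c => !(PySem.Set.contains (PySem.Set.ofList l1) c))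
      = (l2.map (pvOcc l1)).any (fun lst => lst.isEmpty) := by
  rw [List.any_map]
  refine List.any_congr rfl ?_
  intro a
  by_cases ha : a ∈ l1
  · simp [PySem.Set.mem_ofList, ha, pvOcc_eq_nil_iff]
  · simp [PySem.Set.mem_ofList, ha, pvOcc_eq_nil_iff]

theorem pvSorted_getElem_le {lst : List Int} (h : lst.Pairwise (· < ·)) {i j : Nat}
    (hij : i ≤ j) (hj : j < lst.length) : lst[i]'(by omega) ≤ lst[j] := by
  rcases Nat.lt_or_eq_of_le hij with h' | h'
  · exact le_of_lt (List.pairwise_iff_getElem.mp h i j (by omega) hj h')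
  · subst h'; exact le_refl _

theorem pvSorted_mem_le_getLast {lst : List Int} (h : lst.Pairwise (· < ·)) {x : Int}
    (hx : x ∈ lst) (hne : lst ≠ []) : x ≤ lst.getLast hne := by
  obtain ⟨i, hi, rfl⟩ := List.mem_iff_getElem.mp hx
  rw [List.getLast_eq_getElem]
  exact pvSorted_getElem_le h (by omega) (by omega)

-- A's inner while loop walks to the first matching position, counting its steps
theorem pvFindA_scan (l1 : List Char) (c : Char) :
    ∀ (d fuel : Nat) (e len : Int), d < fuel → 0 ≤ e → e < (l1.length : Int) →
    (∀ t : Nat, t < d → l1[(e.toNat + t) % l1.length]? ≠ some c) →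
    l1[(e.toNat + d) % l1.length]? = some c →
    pvFindA l1 (l1.length : Int) c fuel e len
      = ((((e.toNat + d) % l1.length : Nat) : Int), len + (d : Int)) := by
  intro d
  induction d with
  | zero =>
    intro fuel e len hfuel he0 he1 _hmiss hhit
    obtain ⟨f, rfl⟩ : ∃ f, fuel = f + 1 := ⟨fuel - 1, by omega⟩
    have helen : e.toNat < l1.length := by omega
    have hmod : (e.toNat + 0) % l1.length = e.toNat := by
      rw [Nat.add_zero]; exact Nat.mod_eq_of_lt helen
    rw [hmod] at hhit ⊢
    rw [List.getElem?_eq_getElem helen] at hhit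
    have hc : l1[e.toNat] = c := Option.some_injective _ hhit
    unfold pvFindA
    rw [PySem.List.pyGet?_eq_some_getElem l1 he0 he1]
    simp [hc, Int.toNat_of_nonneg he0]
  | succ d ih =>
    intro fuel e len hfuel he0 he1 hmiss hhit
    obtain ⟨f, rfl⟩ : ∃ f, fuel = f + 1 := ⟨fuel - 1, by omega⟩
    have helen : e.toNat < l1.length := by omega
    have hm0 : 0 < l1.length := by omega
    have hne : l1[e.toNat] ≠ c := by
      intro hcc
      exact hmiss 0 (by omega) (by
        rw [Nat.add_zero, Nat.mod_eq_of_lt helen,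
          List.getElem?_eq_getElem helen, hcc])
    unfold pvFindA
    rw [PySem.List.pyGet?_eq_some_getElem l1 he0 he1]
    simp only [ne_eq, hne, not_false_eq_true, if_pos]
    set e2 : Int := PySem.Int.mod (e + 1) (l1.length : Int) with he2
    have he2v : e2 = (((e.toNat + 1) % l1.length : Nat) : Int) := by
      rw [he2, PySem.Int.mod_eq_emod_of_pos (by exact_mod_cast hm0)]
      push_cast
      congr 1
      omega
    have he20 : 0 ≤ e2 := by rw [he2v]; positivity
    have he21 : e2 < (l1.length : Int) := by
      rw [he2v]; exact_mod_cast Nat.mod_lt _ hm0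
    have he2t : e2.toNat = (e.toNat + 1) % l1.length := by
      rw [he2v, Int.toNat_natCast]
    rw [ih f e2 (len + 1) (by omega) he20 he21 ?_ ?_]
    · rw [he2t, Nat.mod_add_mod, show e.toNat + 1 + d = e.toNat + (d + 1) by omega]
      simp only [Prod.mk.injEq]
      exact ⟨trivial, by push_cast; ring⟩
    · intro t ht
      rw [he2t, Nat.mod_add_mod]
      have := hmiss (t + 1) (by omega)
      rwa [show e.toNat + (t + 1) = e.toNat + 1 + t by omega] at this
    · rw [he2t, Nat.mod_add_mod]
      rwa [show e.toNat + 1 + d = e.toNat + (d + 1) by omega]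

-- A's inner while loop computes exactly what one pvStepB bisect step computes
theorem pvFind_step (l1 : List Char) (c : Char) (e len last0 acc : Int)
    (he0 : 0 ≤ e) (he1 : e < (l1.length : Int)) (hc : c ∈ l1) :
    pvFindA l1 (l1.length : Int) c ((l1.length : Int)).toNat e len
        = ((pvStepB (l1.length : Int) (e, last0, acc) (pvOcc l1 c)).2.1,
           len + ((pvStepB (l1.length : Int) (e, last0, acc) (pvOcc l1 c)).2.2 - acc - 1))
      ∧ 0 ≤ (pvStepB (l1.length : Int) (e, last0, acc) (pvOcc l1 c)).2.1
      ∧ (pvStepB (l1.length : Int) (e, last0, acc) (pvOcc l1 c)).2.1 < (l1.length : Int)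
      ∧ acc + 1 ≤ (pvStepB (l1.length : Int) (e, last0, acc) (pvOcc l1 c)).2.2
      ∧ (pvStepB (l1.length : Int) (e, last0, acc) (pvOcc l1 c)).1
          = PySem.Int.mod ((pvStepB (l1.length : Int) (e, last0, acc) (pvOcc l1 c)).2.1 + 1) (l1.length : Int) := by
  have hm0 : 0 < l1.length := List.length_pos_of_mem hc
  have hpw := pvOcc_pairwise l1 c
  have hpwle : (pvOcc l1 c).Pairwise (· ≤ ·) := hpw.imp le_of_lt
  obtain ⟨hk_le, hk_lt, hk_ge⟩ := PySem.List.bisectLeft_spec (pvOcc l1 c) e hpwle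
  have hlstne : pvOcc l1 c ≠ [] := fun h => ((pvOcc_eq_nil_iff l1 c).mp h) hc
  have hlstpos : 0 < (pvOcc l1 c).length := List.length_pos_iff.mpr hlstne
  have htoNat : ((l1.length : Int)).toNat = l1.length := Int.toNat_natCast _
  have hcastE : ((e.toNat : Nat) : Int) = e := Int.toNat_of_nonneg he0
  by_cases hkl : PySem.List.bisectLeft (pvOcc l1 c) e < (pvOcc l1 c).length
  · -- some occurrence at or after e
    obtain ⟨p, hp, hxp, hcp⟩ := (pvOcc_mem l1 c _).mp (List.getElem_mem hkl)
    have hep : e ≤ (p : Int) := by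
      have := hk_ge _ hkl (le_refl _)
      rwa [hxp] at this
    have hept : e.toNat ≤ p := by omega
    have hstep : pvStepB (l1.length : Int) (e, last0, acc) (pvOcc l1 c)
        = (PySem.Int.mod ((p : Int) + 1) (l1.length : Int), (p : Int), acc + ((p : Int) - e + 1)) := by
      simp only [pvStepB]
      rw [if_pos (show ((PySem.List.bisectLeft (pvOcc l1 c) e : Nat) : Int) < ((pvOcc l1 c).length : Int) from by exact_mod_cast hkl)]
      rw [PySem.List.pyGetD_eq_getElem _ _ (by positivity) (by exact_mod_cast hkl)]
      simp only [Int.toNat_natCast]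
      rw [hxp, if_pos (by exact hep)]
    have hd : p - e.toNat < l1.length := by omega
    have hscan := pvFindA_scan l1 c (p - e.toNat) l1.length e len (by omega) he0 he1 ?_ ?_
    · rw [hstep, htoNat, hscan]
      dsimp only
      rw [show e.toNat + (p - e.toNat) = p by omega, Nat.mod_eq_of_lt hp]
      refine ⟨?_, by positivity, by exact_mod_cast hp, by omega, rfl⟩
      simp only [Prod.mk.injEq]
      exact ⟨by trivial, by omega⟩
    · intro t ht
      have hpos : e.toNat + t < l1.length := by omega
      rw [Nat.mod_eq_of_lt hpos]
      intro hcon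
      obtain ⟨j, hj, hlj⟩ := List.mem_iff_getElem.mp
        ((pvOcc_mem l1 c _).mpr ⟨e.toNat + t, hpos, rfl, hcon⟩)
      by_cases hjk : j < PySem.List.bisectLeft (pvOcc l1 c) e
      · have := hk_lt j hj hjk
        rw [hlj] at this
        omega
      · have := pvSorted_getElem_le hpw (Nat.le_of_not_lt hjk) hj
        rw [hlj, hxp] at this
        omega
    · rw [show e.toNat + (p - e.toNat) = p by omega, Nat.mod_eq_of_lt hp]
      exact hcp
  · -- every occurrence is before e: wrap to the first one
    obtain ⟨p0, hp0, hxp0, hcp0⟩ := (pvOcc_mem l1 c _).mp (List.getElem_mem hlstpos)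
    have hall_lt : ∀ (j : Nat) (hj : j < (pvOcc l1 c).length), (pvOcc l1 c)[j] < e := by
      intro j hj
      exact hk_lt j hj (by omega)
    have hp0e : (p0 : Int) < e := by
      have := hall_lt 0 hlstpos
      rwa [hxp0] at this
    have hp0et : p0 < e.toNat := by omega
    have het : e.toNat < l1.length := by omega
    have hstep : pvStepB (l1.length : Int) (e, last0, acc) (pvOcc l1 c)
        = (PySem.Int.mod ((p0 : Int) + 1) (l1.length : Int), (p0 : Int),
           acc + ((l1.length : Int) - e + (p0 : Int) + 1)) := by
      simp only [pvStepB]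
      rw [if_neg (show ¬ ((PySem.List.bisectLeft (pvOcc l1 c) e : Nat) : Int) < ((pvOcc l1 c).length : Int) from by exact_mod_cast hkl)]
      rw [PySem.List.pyGetD_eq_getElem _ _ (by norm_num) (by exact_mod_cast hlstpos)]
      simp only [Int.toNat_zero]
      rw [hxp0, if_neg (by omega)]
    set d : Nat := l1.length - e.toNat + p0 with hdd
    have hd : d < l1.length := by omega
    have hscan := pvFindA_scan l1 c d l1.length e len (by omega) he0 he1 ?_ ?_
    · rw [hstep, htoNat, hscan]
      dsimp only
      rw [show e.toNat + d = l1.length + p0 by omega, Nat.add_mod_left, Nat.mod_eq_of_lt hp0]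
      refine ⟨?_, by positivity, by exact_mod_cast hp0, by omega, rfl⟩
      simp only [Prod.mk.injEq]
      exact ⟨by trivial, by omega⟩
    · intro t ht hcon
      by_cases hcase : e.toNat + t < l1.length
      · rw [Nat.mod_eq_of_lt hcase] at hcon
        obtain ⟨j, hj, hlj⟩ := List.mem_iff_getElem.mp
          ((pvOcc_mem l1 c _).mpr ⟨e.toNat + t, hcase, rfl, hcon⟩)
        have := hall_lt j hj
        rw [hlj] at this
        omega
      · have hlt2 : e.toNat + t - l1.length < p0 := by omega
        have hmodv : (e.toNat + t) % l1.length = e.toNat + t - l1.length := by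
          rw [Nat.mod_eq_sub_mod (by omega), Nat.mod_eq_of_lt (by omega)]
        rw [hmodv] at hcon
        obtain ⟨j, hj, hlj⟩ := List.mem_iff_getElem.mp
          ((pvOcc_mem l1 c _).mpr ⟨e.toNat + t - l1.length, by omega, rfl, hcon⟩)
        have := pvSorted_getElem_le hpw (Nat.zero_le j) hj
        rw [hlj, hxp0] at this
        omega
    · rw [show e.toNat + d = l1.length + p0 by omega, Nat.add_mod_left, Nat.mod_eq_of_lt hp0]
      exact hcp0

theorem pvCheckA_single (l1 : List Char) (m : Int) (c : Char) (e len : Int) :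
    pvCheckA l1 m [c] e len = pvFindA l1 m c m.toNat e len := rfl

theorem pvCheckA_cons (l1 : List Char) (m : Int) (c c2 : Char) (rest : List Char) (e len : Int) :
    pvCheckA l1 m (c :: c2 :: rest) e len
      = pvCheckA l1 m (c2 :: rest) (PySem.Int.mod ((pvFindA l1 m c m.toNat e len).1 + 1) m)
          ((pvFindA l1 m c m.toNat e len).2 + 1) := rfl

-- A's check equals B's fold of bisect steps
theorem pvCheckA_eq (l1 : List Char) :
    ∀ (l2' : List Char) (e len acc last0 : Int), l2' ≠ [] → 0 ≤ e → e < (l1.length : Int) →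
    (∀ x ∈ l2', x ∈ l1) →
    pvCheckA l1 (l1.length : Int) l2' e len
        = (((l2'.map (pvOcc l1)).foldl (pvStepB (l1.length : Int)) (e, last0, acc)).2.1,
           len - 1 - acc + ((l2'.map (pvOcc l1)).foldl (pvStepB (l1.length : Int)) (e, last0, acc)).2.2)
      ∧ 0 ≤ ((l2'.map (pvOcc l1)).foldl (pvStepB (l1.length : Int)) (e, last0, acc)).2.1
      ∧ ((l2'.map (pvOcc l1)).foldl (pvStepB (l1.length : Int)) (e, last0, acc)).2.1 < (l1.length : Int)
      ∧ acc + 1 ≤ ((l2'.map (pvOcc l1)).foldl (pvStepB (l1.length : Int)) (e, last0, acc)).2.2 := by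
  intro l2'
  induction l2' with
  | nil => intro e len acc last0 hne; exact absurd rfl hne
  | cons c rest ih =>
    intro e len acc last0 _hne he0 he1 hall
    have hc : c ∈ l1 := hall c List.mem_cons_self
    obtain ⟨hfeq, h0, h1, hacc, hst1⟩ := pvFind_step l1 c e len last0 acc he0 he1 hc
    have hm0 : 0 < l1.length := List.length_pos_of_mem hc
    cases rest with
    | nil =>
      rw [pvCheckA_single, hfeq]
      simp only [List.map_cons, List.map_nil, List.foldl_cons, List.foldl_nil]
      exact ⟨by simp only [Prod.mk.injEq]; exact ⟨by trivial, by omega⟩, h0, h1, by omega⟩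
    | cons c2 rest' =>
      rw [pvCheckA_cons, hfeq]
      simp only [List.map_cons, List.foldl_cons]
      rw [← hst1]
      have hb0 : 0 ≤ (pvStepB (l1.length : Int) (e, last0, acc) (pvOcc l1 c)).1 := by
        rw [hst1]; exact PySem.Int.mod_nonneg _ (by exact_mod_cast hm0)
      have hb1 : (pvStepB (l1.length : Int) (e, last0, acc) (pvOcc l1 c)).1 < (l1.length : Int) := by
        rw [hst1]; exact PySem.Int.mod_lt _ (by exact_mod_cast hm0)
      obtain ⟨hrec, r0, r1, racc⟩ := ih (pvStepB (l1.length : Int) (e, last0, acc) (pvOcc l1 c)).1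
        (len + ((pvStepB (l1.length : Int) (e, last0, acc) (pvOcc l1 c)).2.2 - acc - 1) + 1)
        (pvStepB (l1.length : Int) (e, last0, acc) (pvOcc l1 c)).2.2
        (pvStepB (l1.length : Int) (e, last0, acc) (pvOcc l1 c)).2.1
        (by simp) hb0 hb1 (fun x hx => hall x (List.mem_cons_of_mem _ hx))
      rw [List.map_cons, List.foldl_cons,
        show ((pvStepB (l1.length : Int) (e, last0, acc) (pvOcc l1 c)).1,
          (pvStepB (l1.length : Int) (e, last0, acc) (pvOcc l1 c)).2.1,
          (pvStepB (l1.length : Int) (e, last0, acc) (pvOcc l1 c)).2.2)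
          = pvStepB (l1.length : Int) (e, last0, acc) (pvOcc l1 c) from rfl] at hrec r0 r1 racc
      rw [hrec]
      refine ⟨by simp only [Prod.mk.injEq]; exact ⟨by trivial, by omega⟩, r0, r1, by omega⟩

-- A's check equals B's table entry
theorem pvCheckAB (l1 l2 : List Char) (e : Int) (hne : l2 ≠ []) (h0 : 0 ≤ e)
    (h1 : e < (l1.length : Int)) (hall : ∀ x ∈ l2, x ∈ l1) :
    pvCheckA l1 (l1.length : Int) l2 e 1 = pvCheckB (l1.length : Int) (l2.map (pvOcc l1)) e
      ∧ 0 ≤ (pvCheckB (l1.length : Int) (l2.map (pvOcc l1)) e).1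
      ∧ (pvCheckB (l1.length : Int) (l2.map (pvOcc l1)) e).1 < (l1.length : Int)
      ∧ 1 ≤ (pvCheckB (l1.length : Int) (l2.map (pvOcc l1)) e).2 := by
  obtain ⟨hh, b0, b1, bacc⟩ := pvCheckA_eq l1 l2 e 1 0 e hne h0 h1 hall
  simp only [pvCheckB]
  refine ⟨?_, b0, b1, by omega⟩
  rw [hh]
  simp only [Prod.mk.injEq]
  exact ⟨by trivial, by omega⟩

-- the two main loops run in lockstep
theorem pvLoop_eq (l1 l2 : List Char) (hne : l2 ≠ []) (hall : ∀ x ∈ l2, x ∈ l1) :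
    ∀ (fuel : Nat) (e : Int) (rec : List Int) (mem : PySem.Set Int) (ls p : Int),
    0 ≤ e → e < (l1.length : Int) →
    pvLoopA l1 (l1.length : Int) l2 fuel e rec mem ls p
      = pvLoopB (l1.length : Int) (l2.map (pvOcc l1)) fuel e rec mem ls p := by
  intro fuel
  induction fuel with
  | zero => intro e rec mem ls p _ _; rfl
  | succ f ihf =>
    intro e rec mem ls p h0 h1
    obtain ⟨hAB, c0, c1, -⟩ := pvCheckAB l1 l2 e hne h0 h1 hall
    have hm0 : (0 : Int) < (l1.length : Int) := by omega
    simp only [pvLoopA, pvLoopB, hAB]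
    by_cases hmem : PySem.Set.contains mem (pvCheckB (l1.length : Int) (l2.map (pvOcc l1)) e).1 = true
    · simp only [hmem, not_true_eq_false, if_false, if_true]
    · simp only [Bool.not_eq_true] at hmem
      simp only [hmem, Bool.false_eq_true, not_false_eq_true, if_true, if_false]
      exact ihf _ _ _ _ _ (PySem.Int.mod_nonneg _ hm0) (PySem.Int.mod_lt _ hm0)

-- invariants of the loop result: record stays nonempty, strictly increasing, same head;
-- length_sum grows by at least 1 per iteration
theorem pvLoopB_props (m : Int) (occ : List (List Int))
    (hT : ∀ e : Int, 0 ≤ e → e < m → 1 ≤ (pvCheckB m occ e).2) (hm : 0 < m) :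
    ∀ (fuel : Nat) (e : Int) (rec : List Int) (mem : PySem.Set Int) (ls p : Int),
    0 ≤ e → e < m → rec ≠ [] → rec.Pairwise (· < ·) →
    (pvLoopB m occ fuel e rec mem ls p).1 ≠ []
      ∧ (pvLoopB m occ fuel e rec mem ls p).1.Pairwise (· < ·)
      ∧ (pvLoopB m occ fuel e rec mem ls p).1.head? = rec.head?
      ∧ ls ≤ (pvLoopB m occ fuel e rec mem ls p).2.1
      ∧ (fuel ≠ 0 → ls + 1 ≤ (pvLoopB m occ fuel e rec mem ls p).2.1) := by
  intro fuel
  induction fuel with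
  | zero =>
    intro e rec mem ls p _ _ hrecne hpw
    exact ⟨hrecne, hpw, rfl, le_refl _, fun h => absurd rfl h⟩
  | succ f ihf =>
    intro e rec mem ls p h0 h1 hrecne hpw
    have hr2 : 1 ≤ (pvCheckB m occ e).2 := hT e h0 h1
    have hlastv : PySem.List.pyGetD rec (-1) 0 = rec.getLast hrecne :=
      PySem.List.pyGetD_neg_one rec 0 hrecne
    have hrec' : (rec ++ [PySem.List.pyGetD rec (-1) 0 + (pvCheckB m occ e).2]).Pairwise (· < ·) := by
      rw [List.pairwise_append]
      refine ⟨hpw, List.pairwise_singleton _ _, ?_⟩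
      intro a ha b hb
      rw [List.mem_singleton] at hb
      subst hb
      rw [hlastv]
      have := pvSorted_mem_le_getLast hpw ha hrecne
      omega
    have hrecne' : rec ++ [PySem.List.pyGetD rec (-1) 0 + (pvCheckB m occ e).2] ≠ [] := by
      simp
    have hhead' : (rec ++ [PySem.List.pyGetD rec (-1) 0 + (pvCheckB m occ e).2]).head? = rec.head? := by
      cases rec with
      | nil => exact absurd rfl hrecne
      | cons a t => simp
    simp only [pvLoopB]
    by_cases hmem : PySem.Set.contains mem (pvCheckB m occ e).1 = true
    · simp only [hmem, if_true]
      exact ⟨hrecne', hrec', hhead', by omega, fun _ => by omega⟩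
    · simp only [hmem, Bool.false_eq_true, if_false]
      obtain ⟨q1, q2, q3, q4, -⟩ := ihf (PySem.Int.mod ((pvCheckB m occ e).1 + 1) m)
        (rec ++ [PySem.List.pyGetD rec (-1) 0 + (pvCheckB m occ e).2])
        (PySem.Set.add mem (pvCheckB m occ e).1)
        (ls + (pvCheckB m occ e).2) (p + 1)
        (PySem.Int.mod_nonneg _ hm) (PySem.Int.mod_lt _ hm) hrecne' hrec'
      exact ⟨q1, q2, by rw [q3, hhead'], by omega, fun _ => by omega⟩

theorem pvBisectRight_unique (lst : List Int) (md : Int) (h : lst.Pairwise (· < ·)) (k : Nat)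
    (hk : k ≤ lst.length) (hle : ∀ j : Nat, (hj : j < lst.length) → j < k → lst[j] ≤ md)
    (hgt : ∀ j : Nat, (hj : j < lst.length) → k ≤ j → md < lst[j]) :
    PySem.List.bisectRight lst md = k := by
  obtain ⟨hle', hlt', hgt'⟩ := PySem.List.bisectRight_spec lst md (h.imp le_of_lt)
  by_contra hne
  rcases Nat.lt_or_ge (PySem.List.bisectRight lst md) k with hh | hh
  · have h1 := hle _ (by omega) hh
    have h2 := hgt' _ (by omega) (le_refl _)
    omega
  · have hh2 : k < PySem.List.bisectRight lst md := by omega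
    have h1 := hlt' k (by omega) hh2
    have h2 := hgt k (by omega) (le_refl _)
    omega

-- A's pop loop leaves exactly bisect_right(record, mod) entries
theorem pvPop_eq (md : Int) : ∀ (n : Nat) (rec : List Int), rec.length = n →
    rec.Pairwise (· < ·) → rec.head? = some 0 → 0 ≤ md →
    (pvPopA rec.length rec md).length = PySem.List.bisectRight rec md := by
  intro n
  induction n using Nat.strong_induction_on with
  | _ n ih =>
    intro rec hlen hpw hhead hmd
    have hne : rec ≠ [] := by intro h; subst h; simp at hhead
    have hlen1 : 1 ≤ rec.length := List.length_pos_iff.mpr hne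
    obtain ⟨hle', hlt', hgt'⟩ := PySem.List.bisectRight_spec rec md (hpw.imp le_of_lt)
    have h00 : rec[0]'(by omega) = 0 := by
      rw [List.head?_eq_getElem?, List.getElem?_eq_getElem (by omega)] at hhead
      exact Option.some_injective _ hhead
    have hk1 : 1 ≤ PySem.List.bisectRight rec md := by
      by_contra hcon
      have := hgt' 0 (by omega) (by omega)
      omega
    obtain ⟨n', hn'⟩ : ∃ n', rec.length = n' + 1 := ⟨rec.length - 1, by omega⟩
    rw [hn']
    simp only [pvPopA]
    rw [PySem.List.pyGetD_neg_one rec 0 hne, List.getLast_eq_getElem]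
    by_cases hcase : md < rec[rec.length - 1]'(by omega)
    · rw [if_pos hcase]
      have hklt : PySem.List.bisectRight rec md < rec.length := by
        by_contra hkk
        have := hlt' (rec.length - 1) (by omega) (by omega)
        omega
      have hdlen : rec.dropLast.length = n' := by
        rw [List.length_dropLast]; omega
      have hdpw : rec.dropLast.Pairwise (· < ·) := List.Pairwise.sublist (List.dropLast_sublist rec) hpw
      have hdne : 2 ≤ rec.length := by omega
      have hdhead : rec.dropLast.head? = some 0 := by
        rw [List.head?_eq_getElem?, List.getElem?_eq_getElem (by rw [hdlen]; omega),
          List.getElem_dropLast, h00]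
      have ihres := ih n' (by omega) rec.dropLast hdlen hdpw hdhead hmd
      rw [show n' = rec.dropLast.length from hdlen.symm, ihres]
      refine pvBisectRight_unique rec.dropLast md hdpw (PySem.List.bisectRight rec md)
        (by rw [hdlen]; omega) ?_ ?_
      · intro j hj hjk
        rw [List.getElem_dropLast]
        exact hlt' j (by omega) hjk
      · intro j hj hjk
        rw [List.getElem_dropLast]
        exact hgt' j (by omega) hjk
    · rw [if_neg hcase]
      have : rec.length ≤ PySem.List.bisectRight rec md := by
        by_contra hcon
        have := hgt' (rec.length - 1) (by omega) (by omega)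
        omega
      omega

-- ===== VERDICT (by name: the statement is the Claim_ definition above) =====
theorem getMaxRepetitions_spec : Claim_equal_getMaxRepetitions := by
  unfold Claim_equal_getMaxRepetitions
  intro s1 n1 s2 n2 _hdom hpre
  obtain ⟨hs2, -⟩ := hpre
  unfold Spec_getMaxRepetitions
  have hl2ne : s2.toList ≠ [] := by
    intro h
    apply hs2
    have := congrArg String.ofList h
    simpa using this
  simp only [getMaxRepetitions, getMaxRepetitions_alt]
  rw [show (fun c => PySem.Dict.getD (pvPos s1.toList) c []) = pvOcc s1.toList from
    funext (pvPos_getD s1.toList)]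
  rw [pvGuard_eq]
  by_cases hg : (s2.toList.map (pvOcc s1.toList)).any (fun lst => lst.isEmpty) = true
  · rw [if_pos hg, if_pos hg]
  · rw [if_neg hg, if_neg hg]
    have hall : ∀ x ∈ s2.toList, x ∈ s1.toList := by
      intro x hx
      by_contra hx'
      have : (pvOcc s1.toList x).isEmpty = true := by
        rw [List.isEmpty_iff, pvOcc_eq_nil_iff]; exact hx'
      exact hg (List.any_eq_true.mpr ⟨pvOcc s1.toList x, List.mem_map_of_mem hx, this⟩)
    have hm0 : 0 < s1.toList.length := by
      obtain ⟨c0', hc0⟩ : ∃ c, c ∈ s2.toList := by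
        cases h : s2.toList with
        | nil => exact absurd h hl2ne
        | cons a t => exact ⟨a, List.mem_cons_self⟩
      exact List.length_pos_of_mem (hall c0' hc0)
    have hmI : (0 : Int) < (s1.toList.length : Int) := by exact_mod_cast hm0
    obtain ⟨hAB, c0, c1, c2⟩ := pvCheckAB s1.toList s2.toList 0 hl2ne (le_refl 0) hmI hall
    rw [hAB]
    by_cases hcond : (s1.toList.length : Int) * n1 < (pvCheckB (s1.toList.length : Int) (s2.toList.map (pvOcc s1.toList)) 0).2
    · rw [if_pos hcond, if_pos hcond]
    · rw [if_neg hcond, if_neg hcond]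
      have he00 : 0 ≤ PySem.Int.mod ((pvCheckB (s1.toList.length : Int) (s2.toList.map (pvOcc s1.toList)) 0).1 + 1) (s1.toList.length : Int) :=
        PySem.Int.mod_nonneg _ hmI
      have he01 : PySem.Int.mod ((pvCheckB (s1.toList.length : Int) (s2.toList.map (pvOcc s1.toList)) 0).1 + 1) (s1.toList.length : Int) < (s1.toList.length : Int) :=
        PySem.Int.mod_lt _ hmI
      rw [pvLoop_eq s1.toList s2.toList hl2ne hall _ _ _ _ _ _ he00 he01]
      have hTprop : ∀ e : Int, 0 ≤ e → e < (s1.toList.length : Int) →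
          1 ≤ (pvCheckB (s1.toList.length : Int) (s2.toList.map (pvOcc s1.toList)) e).2 := by
        intro e h0 h1
        exact (pvCheckAB s1.toList s2.toList e hl2ne h0 h1 hall).2.2.2
      obtain ⟨q1, q2, q3, q4, q5⟩ := pvLoopB_props (s1.toList.length : Int)
        (s2.toList.map (pvOcc s1.toList))
        hTprop hmI ((s1.toList.length : Int).toNat + 2)
        (PySem.Int.mod ((pvCheckB (s1.toList.length : Int) (s2.toList.map (pvOcc s1.toList)) 0).1 + 1) (s1.toList.length : Int))
        [0] (PySem.Set.add PySem.Set.empty (pvCheckB (s1.toList.length : Int) (s2.toList.map (pvOcc s1.toList)) 0).1)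
        0 0 he00 he01 (by simp) (List.pairwise_singleton _ _)
      have hls : 1 ≤ (pvLoopB (s1.toList.length : Int)
          (s2.toList.map (pvOcc s1.toList))
          ((s1.toList.length : Int).toNat + 2)
          (PySem.Int.mod ((pvCheckB (s1.toList.length : Int) (s2.toList.map (pvOcc s1.toList)) 0).1 + 1) (s1.toList.length : Int))
          [0] (PySem.Set.add PySem.Set.empty (pvCheckB (s1.toList.length : Int) (s2.toList.map (pvOcc s1.toList)) 0).1)
          0 0).2.1 := by
        have := q5 (by omega)
        omega
      rw [pvPop_eq _ _ _ rfl q2 (by rw [q3]; rfl) (PySem.Int.mod_nonneg _ (by omega))]
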